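-- pv_equiv track=rewrite | github.com/JamesMakarov/reconhecimento_facial_aluno | src/utils_texto.py | extrair_partes_nome
-- ===== SOURCE A (Python) =====
-- def extrair_partes_nome(nome_completo, n_partes_reais):
-- 	partes = nome_completo.strip().split()
-- 	preposicoes = {"da", "de", "do", "das", "dos", "e"}
-- 	nome_final = []
-- 	partes_adicionadas = 0
--
-- 	for p in partes:
-- 		if partes_adicionadas < n_partes_reais:
-- 			nome_final.append(p)
-- 			if p.lower() not in preposicoes:
-- 				partes_adicionadas += 1
-- 		else:
-- 			break
-- 	return " ".join(nome_final).title()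
-- ===== SOURCE B (Python) =====
-- def extrair_partes_nome(nome_completo, n_partes_reais):
-- 	partes = nome_completo.strip().split()
-- 	preposicoes = {"da", "de", "do", "das", "dos", "e"}
-- 	reais = [i for i, p in enumerate(partes) if p.lower() not in preposicoes]
-- 	if n_partes_reais < 1:
-- 		cutoff = 0
-- 	elif len(reais) >= n_partes_reais:
-- 		cutoff = reais[n_partes_reais - 1] + 1
-- 	else:
-- 		cutoff = len(partes)
-- 	return " ".join(partes[:cutoff]).title()
-- ===== Notes on version B (the rewrite author's own statement) =====
-- stated objective: alternative
-- what changed: Replaces A's stateful counter-and-break loop over the parts by an enumerate-filter index table of the real (non-preposition) parts plus a single computed slice cutoff, then one slice and join.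
import Mathlib
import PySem

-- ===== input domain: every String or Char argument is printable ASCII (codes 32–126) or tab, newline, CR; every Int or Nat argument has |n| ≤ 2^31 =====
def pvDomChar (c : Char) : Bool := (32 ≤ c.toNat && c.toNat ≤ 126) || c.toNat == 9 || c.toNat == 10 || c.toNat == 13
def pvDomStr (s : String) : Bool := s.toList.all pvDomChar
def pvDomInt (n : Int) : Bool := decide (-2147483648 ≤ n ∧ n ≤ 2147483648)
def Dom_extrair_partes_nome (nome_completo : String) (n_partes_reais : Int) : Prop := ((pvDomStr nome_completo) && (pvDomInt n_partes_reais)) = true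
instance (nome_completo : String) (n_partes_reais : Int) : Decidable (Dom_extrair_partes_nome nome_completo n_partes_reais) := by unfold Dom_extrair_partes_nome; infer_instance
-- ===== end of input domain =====

-- B replaces A's stateful counter-and-break loop by an index table of the real
-- (non-preposition) parts plus a single computed slice cutoff (objective: alternative decomposition).

-- shared helpers (both Pythons use the same set literal, `.lower()` test and `.title()`)
def pvPreps : PySem.Set String := PySem.Set.ofList ["da", "de", "do", "das", "dos", "e"]

def pvIsPrep (p : String) : Bool := PySem.Set.contains pvPreps (PySem.Str.lower p)

-- Python str.title(): a letter starts a word (uppercased) iff the previous char is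
-- not a letter; later letters of a word are lowercased. Hand-ported (PySem has no title);
-- exact on the ASCII domain, where the cased characters are exactly the letters.
def pvTitleChars : List Char → Bool → List Char
  | [], _ => []
  | c :: rest, prevAlpha =>
    (if PySem.Chars.isalpha c then
       (if prevAlpha then PySem.Chars.lowerChar c else PySem.Chars.upperChar c)
     else c) :: pvTitleChars rest (PySem.Chars.isalpha c)

def pvTitle (s : String) : String := String.ofList (pvTitleChars s.toList false)

-- ===== PORT A =====
-- the for-loop with the `partes_adicionadas` counter and the break
def pvALoop (n : Int) : List String → Int → List String
  | [], _ => []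
  | p :: rest, k =>
    if k < n then
      p :: (if pvIsPrep p then pvALoop n rest k else pvALoop n rest (k + 1))
    else []

def extrair_partes_nome (nome_completo : String) (n_partes_reais : Int) : String :=
  pvTitle (PySem.Str.join " "
    (pvALoop n_partes_reais (PySem.Str.split₀ (PySem.Str.strip nome_completo)) 0))

-- ===== PORT B =====
-- reais = [i for i, p in enumerate(partes) if p.lower() not in preposicoes]
def pvReais (partes : List String) : List Int :=
  ((PySem.List.enumerate partes 0).filter (fun ip => !pvIsPrep ip.2)).map Prod.fst

-- the if/elif/else computing the slice cutoff
def pvCutoff (partes : List String) (n : Int) : Int :=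
  if n < 1 then 0
  else if ((pvReais partes).length : Int) ≥ n then
    -- reais[n - 1] is in range here; pyGet? returns some
    (match PySem.List.pyGet? (pvReais partes) (n - 1) with
     | some i => i + 1
     | none => 0)
  else (partes.length : Int)

def extrair_partes_nome_alt (nome_completo : String) (n_partes_reais : Int) : String :=
  pvTitle (PySem.Str.join " "
    (PySem.List.slice (PySem.Str.split₀ (PySem.Str.strip nome_completo)) none
      (some (pvCutoff (PySem.Str.split₀ (PySem.Str.strip nome_completo)) n_partes_reais))))

-- ===== PRECONDITION & SPEC =====
def Spec_extrair_partes_nome (nome_completo : String) (n_partes_reais : Int) (out : String) : Prop := out = extrair_partes_nome_alt nome_completo n_partes_reais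
instance (nome_completo : String) (n_partes_reais : Int) (out : String) : Decidable (Spec_extrair_partes_nome nome_completo n_partes_reais out) := by unfold Spec_extrair_partes_nome; infer_instance

-- ===== CLAIM (what is proved, stated in full; the proofs are below) =====
def Claim_equal_extrair_partes_nome : Prop := ∀ (nome_completo : String) (n_partes_reais : Int), Dom_extrair_partes_nome nome_completo n_partes_reais → Spec_extrair_partes_nome nome_completo n_partes_reais (extrair_partes_nome nome_completo n_partes_reais)

-- ===== LEMMAS AND PROOFS =====

-- proof-side characterisation of both programs: the number of leading parts kept
def pvCut : List String → Int → Nat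
  | [], _ => 0
  | p :: rest, m => if 0 < m then pvCut rest (if pvIsPrep p then m else m - 1) + 1 else 0

theorem pvALoop_eq_take (n : Int) (l : List String) (k : Int) :
    pvALoop n l k = l.take (pvCut l (n - k)) := by
  induction l generalizing k with
  | nil => rfl
  | cons p rest ih =>
    by_cases h : k < n
    · have h0 : 0 < n - k := by omega
      simp only [pvALoop, pvCut, if_pos h, if_pos h0, List.take_succ_cons]
      by_cases hp : pvIsPrep p
      · simp [hp, ih k]
      · have : n - (k + 1) = n - k - 1 := by omega
        simp [hp, ih (k + 1), this]
    · have h0 : ¬ 0 < n - k := by omega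
      simp [pvALoop, pvCut, h]

-- the real-part index table of a cons, via a shift of the tail's table
theorem pvReais_shift (xs : List String) (s t : Int) :
    ((PySem.List.enumerate xs (s + t)).filter (fun ip => !pvIsPrep ip.2)).map Prod.fst
      = (((PySem.List.enumerate xs t).filter (fun ip => !pvIsPrep ip.2)).map Prod.fst).map (· + s) := by
  induction xs generalizing t with
  | nil => simp [PySem.List.enumerate_nil]
  | cons x xs ih =>
    simp only [PySem.List.enumerate_cons, List.filter_cons]
    by_cases hx : pvIsPrep x
    · have : s + t + 1 = s + (t + 1) := by omega
      simpa [hx, this] using ih (t + 1)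
    · have : s + t + 1 = s + (t + 1) := by omega
      simp [hx, this, ih (t + 1)]
      omega

theorem pvReais_cons (p : String) (rest : List String) :
    pvReais (p :: rest)
      = (if pvIsPrep p then ([] : List Int) else [0]) ++ (pvReais rest).map (· + 1) := by
  unfold pvReais
  simp only [PySem.List.enumerate_cons, List.filter_cons]
  have h := pvReais_shift rest 1 0
  by_cases hp : pvIsPrep p
  · simpa [hp] using h
  · simpa [hp] using h

-- one step of B's cutoff
theorem pvCutoff_cons (p : String) (rest : List String) (n : Int) (h1 : 1 ≤ n) :
    pvCutoff (p :: rest) n = pvCutoff rest (if pvIsPrep p then n else n - 1) + 1 := by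
  have hc := pvReais_cons p rest
  by_cases hp : pvIsPrep p
  · simp only [hp, if_true, List.nil_append] at hc ⊢
    by_cases hin : ((pvReais rest).length : Int) ≥ n
    · obtain ⟨j, hj'⟩ : ∃ j : Nat, n - 1 = (j : Int) := ⟨(n - 1).toNat, by omega⟩
      have hj : j < (pvReais rest).length := by omega
      have e1 : PySem.List.pyGet? ((pvReais rest).map (· + 1)) (n - 1)
          = some ((pvReais rest)[j] + 1) := by
        rw [hj', PySem.List.pyGet?_natCast]
        simp [List.getElem?_eq_getElem hj]
      have e2 : PySem.List.pyGet? (pvReais rest) (n - 1) = some ((pvReais rest)[j]) := by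
        rw [hj', PySem.List.pyGet?_natCast]
        simp [List.getElem?_eq_getElem hj]
      simp only [pvCutoff, hc, e1, e2, List.length_map]
      split_ifs <;> omega
    · simp only [pvCutoff, hc, List.length_map, List.length_cons]
      split_ifs <;> omega
  · simp only [hp, Bool.false_eq_true, if_false, List.singleton_append] at hc ⊢
    by_cases hn1 : n = 1
    · subst hn1
      simp [pvCutoff, hc, PySem.List.pyGet?, PySem.List.pyIdx?]
    · have h2 : 2 ≤ n := by omega
      by_cases hin : ((pvReais rest).length : Int) + 1 ≥ n
      · obtain ⟨j, hj'⟩ : ∃ j : Nat, n - 2 = (j : Int) := ⟨(n - 2).toNat, by omega⟩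
        have hj : j < (pvReais rest).length := by omega
        have e1 : PySem.List.pyGet? ((0 : Int) :: (pvReais rest).map (· + 1)) (n - 1)
            = some ((pvReais rest)[j] + 1) := by
          rw [show n - 1 = (((j + 1 : Nat)) : Int) by omega, PySem.List.pyGet?_natCast]
          simp [List.getElem?_eq_getElem hj]
        have e2 : PySem.List.pyGet? (pvReais rest) (n - 1 - 1)
            = some ((pvReais rest)[j]) := by
          rw [show n - 1 - 1 = ((j : Nat) : Int) by omega, PySem.List.pyGet?_natCast]
          simp [List.getElem?_eq_getElem hj]
        simp only [pvCutoff, hc, e1, e2, List.length_cons, List.length_map]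
        split_ifs <;> omega
      · simp only [pvCutoff, hc, List.length_cons, List.length_map]
        split_ifs <;> omega

theorem pvCutoff_eq_pvCut (l : List String) (n : Int) :
    pvCutoff l n = (pvCut l n : Int) := by
  induction l generalizing n with
  | nil =>
    simp only [pvCutoff, pvReais, PySem.List.enumerate_nil, List.filter_nil, List.map_nil,
      pvCut]
    split_ifs <;> simp_all; omega
  | cons p rest ih =>
    by_cases h1 : 1 ≤ n
    · have h0 : 0 < n := by omega
      rw [pvCutoff_cons p rest n h1]
      simp only [pvCut, if_pos h0]
      by_cases hp : pvIsPrep p <;> simp [hp, ih]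
    · have h0 : ¬ 0 < n := by omega
      simp only [pvCut, if_neg h0]
      simp [pvCutoff]
      omega

theorem selected_eq (partes : List String) (n : Int) :
    pvALoop n partes 0 = PySem.List.slice partes none (some (pvCutoff partes n)) := by
  have hcut := pvCutoff_eq_pvCut partes n
  have hnn : 0 ≤ pvCutoff partes n := by rw [hcut]; positivity
  rw [PySem.List.slice_to _ hnn, hcut]
  have := pvALoop_eq_take n partes 0
  simpa using this

-- ===== VERDICT (by name: the statement is the Claim_ definition above) =====
theorem extrair_partes_nome_spec : Claim_equal_extrair_partes_nome := by
  intro nome n _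
  unfold Spec_extrair_partes_nome extrair_partes_nome extrair_partes_nome_alt
  rw [selected_eq]
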